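-- pv_equiv track=rewrite | github.com/Vamerk/shashki | Model/logic.py | return_max_chains
-- ===== SOURCE A (Python) =====
-- def return_max_chains(result):
--     """Возвращает максимально длинные цепи"""
--
--     max_chain_length = 0
--     max_chains = []
--
--     for _chain in result:
--         if len(_chain) > max_chain_length:
--             max_chain_length = len(_chain)
--             max_chains.clear()
--
--         if len(_chain) >= max_chain_length:
--             max_chains.append(_chain)
--
--     return max_chains
-- ===== SOURCE B (Python) =====
-- def return_max_chains(result):
--     """Возвращает максимально длинные цепи"""
--     if not result:
--         return []
--     m = max(map(len, result))
--     return [c for c in result if len(c) == m]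
-- ===== Notes on version B (the rewrite author's own statement) =====
-- stated objective: simpler
-- what changed: Replaces the single running-max-with-clear-and-accumulate loop by two sequential passes: a guarded max() over the lengths, then a comprehension keeping exactly the chains of that length.
import Mathlib
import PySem

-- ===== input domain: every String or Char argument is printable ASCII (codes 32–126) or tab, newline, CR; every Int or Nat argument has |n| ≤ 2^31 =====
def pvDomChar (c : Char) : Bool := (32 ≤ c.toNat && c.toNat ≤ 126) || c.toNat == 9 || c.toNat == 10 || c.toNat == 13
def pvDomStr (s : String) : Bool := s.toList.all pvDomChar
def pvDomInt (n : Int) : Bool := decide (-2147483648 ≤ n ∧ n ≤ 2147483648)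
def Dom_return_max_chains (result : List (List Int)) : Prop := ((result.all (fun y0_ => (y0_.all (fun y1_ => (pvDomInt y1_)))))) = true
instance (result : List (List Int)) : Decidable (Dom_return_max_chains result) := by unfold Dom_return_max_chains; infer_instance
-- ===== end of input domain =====

-- B replaces A's single running-max loop (with clear-and-append) by two passes:
-- a guarded max over the lengths, then a filter keeping chains of that length ("simpler").

-- ===== PORT A =====
-- state = (max_chain_length, max_chains); each iteration first maybe raises the max
-- and clears, then maybe appends — exactly A's two ifs in order.
def return_max_chains (result : List (List Int)) : List (List Int) :=
  (result.foldl
    (fun (st : Nat × List (List Int)) c =>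
      let st1 := if c.length > st.1 then (c.length, ([] : List (List Int))) else st
      if c.length ≥ st1.1 then (st1.1, st1.2 ++ [c]) else st1)
    (0, [])).2

-- ===== PORT B =====
def return_max_chains_alt (result : List (List Int)) : List (List Int) :=
  if result = [] then []
  else
    let m := (PySem.List.max? (result.map List.length) (fun x => x)).getD 0
    result.filter (fun c => c.length == m)

-- ===== PRECONDITION & SPEC =====
def Spec_return_max_chains (result : List (List Int)) (out : List (List Int)) : Prop := out = return_max_chains_alt result
instance (result : List (List Int)) (out : List (List Int)) : Decidable (Spec_return_max_chains result out) := by unfold Spec_return_max_chains; infer_instance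

-- ===== CLAIM (what is proved, stated in full; the proofs are below) =====
def Claim_equal_return_max_chains : Prop := ∀ (result : List (List Int)), Dom_return_max_chains result → Spec_return_max_chains result (return_max_chains result)

-- ===== LEMMAS AND PROOFS =====

-- the maximum chain length (0 on empty input)
def pvMaxLen (l : List (List Int)) : Nat := l.foldr (fun c r => max c.length r) 0

lemma pvMaxLen_cons (c : List Int) (t : List (List Int)) :
    pvMaxLen (c :: t) = max c.length (pvMaxLen t) := by simp [pvMaxLen]

lemma pvFoldlMax (t : List (List Int)) : ∀ a : Nat,
    (t.map List.length).foldl max a = max a (pvMaxLen t) := by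
  induction t with
  | nil => intro a; simp [pvMaxLen]
  | cons c t ih =>
    intro a
    rw [pvMaxLen_cons, List.map_cons, List.foldl_cons, ih]
    omega

lemma pvMax?_eq (c : List Int) (t : List (List Int)) :
    (PySem.List.max? ((c :: t).map List.length) (fun x => x)).getD 0 = pvMaxLen (c :: t) := by
  rw [List.map_cons, PySem.List.max?_id_cons]
  simp only [Option.getD_some]
  rw [pvFoldlMax]
  simp [pvMaxLen]

-- invariant of A's loop: starting in state (m, acc), the fold reaches max m (pvMaxLen l);
-- if some chain exceeds m the accumulator is replaced by the chains of maximal length,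
-- otherwise the chains of length m are appended to acc.
lemma pvLoop (l : List (List Int)) : ∀ (m : Nat) (acc : List (List Int)),
    l.foldl
      (fun (st : Nat × List (List Int)) c =>
        let st1 := if c.length > st.1 then (c.length, ([] : List (List Int))) else st
        if c.length ≥ st1.1 then (st1.1, st1.2 ++ [c]) else st1)
      (m, acc)
    = (max m (pvMaxLen l),
       if m < pvMaxLen l then l.filter (fun c => c.length == pvMaxLen l)
       else acc ++ l.filter (fun c => c.length == m)) := by
  induction l with
  | nil => intro m acc; simp [pvMaxLen]
  | cons c t ih =>
    intro m acc
    rw [pvMaxLen_cons]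
    simp only [List.foldl_cons]
    by_cases h : c.length > m
    · simp only [if_pos h, ge_iff_le, le_refl, if_pos]
      rw [ih]
      have hmm : max m (max c.length (pvMaxLen t)) = max c.length (pvMaxLen t) := by omega
      by_cases h2 : c.length < pvMaxLen t
      · have : m < max c.length (pvMaxLen t) := by omega
        rw [hmm, if_pos h2, if_pos this]
        have hne : ¬ (c.length == pvMaxLen t) = true := by simp; omega
        have : max c.length (pvMaxLen t) = pvMaxLen t := by omega
        simp [this, hne]
      · have hM : max c.length (pvMaxLen t) = c.length := by omega
        rw [hmm, if_neg h2, if_pos (by omega : m < max c.length (pvMaxLen t))]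
        simp [hM]
    · simp only [if_neg h]
      by_cases he : c.length ≥ m
      · have hcm : c.length = m := by omega
        simp only [if_pos he]
        rw [ih]
        have hmax : max m (max c.length (pvMaxLen t)) = max m (pvMaxLen t) := by omega
        by_cases h2 : m < pvMaxLen t
        · have : m < max c.length (pvMaxLen t) := by omega
          rw [hmax, if_pos h2, if_pos this]
          have hM : max c.length (pvMaxLen t) = pvMaxLen t := by omega
          have hne : ¬ (c.length == pvMaxLen t) = true := by simp; omega
          simp [hM, hne]
        · have : ¬ m < max c.length (pvMaxLen t) := by omega
          rw [hmax, if_neg h2, if_neg this]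
          simp [hcm]
      · simp only [if_neg he]
        rw [ih]
        have hmax : max m (max c.length (pvMaxLen t)) = max m (pvMaxLen t) := by omega
        by_cases h2 : m < pvMaxLen t
        · have : m < max c.length (pvMaxLen t) := by omega
          rw [hmax, if_pos h2, if_pos this]
          have hM : max c.length (pvMaxLen t) = pvMaxLen t := by omega
          have hne : ¬ (c.length == pvMaxLen t) = true := by simp; omega
          simp [hM, hne]
        · have : ¬ m < max c.length (pvMaxLen t) := by omega
          rw [hmax, if_neg h2, if_neg this]
          have hne : ¬ (c.length == m) = true := by simp; omega
          simp [hne]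

-- ===== VERDICT (by name: the statement is the Claim_ definition above) =====
theorem return_max_chains_spec : Claim_equal_return_max_chains := by
  intro result _
  unfold Spec_return_max_chains return_max_chains return_max_chains_alt
  cases result with
  | nil => simp
  | cons c t =>
    rw [pvLoop, pvMax?_eq]
    simp only [reduceCtorEq, if_false]
    by_cases h2 : 0 < pvMaxLen (c :: t)
    · simp [if_pos h2]
    · have h0 : pvMaxLen (c :: t) = 0 := by omega
      simp [h0]
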